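-- pv_equiv track=rewrite | github.com/paiml/depyler | examples/hard_final_sec_prng.py | chi_squared_uniformity
-- ===== SOURCE A (Python) =====
-- def chi_squared_uniformity(values: list[int], num_bins: int) -> int:
--     """Chi-squared test for uniformity * 1000. Lower = more uniform."""
--     bins: list[int] = []
--     bi: int = 0
--     while bi < num_bins:
--         bins.append(0)
--         bi = bi + 1
--     n: int = len(values)
--     i: int = 0
--     while i < n:
--         vv: int = values[i]
--         bucket: int = vv % num_bins
--         old: int = bins[bucket]
--         bins[bucket] = old + 1
--         i = i + 1
--     expected: int = n // num_bins
--     if expected == 0: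
--         expected = 1
--     chi_sq: int = 0
--     j: int = 0
--     while j < num_bins:
--         observed: int = bins[j]
--         diff: int = observed - expected
--         chi_sq = chi_sq + diff * diff * 1000 // expected
--         j = j + 1
--     return chi_sq
-- ===== SOURCE B (Python) =====
-- def chi_squared_uniformity(values: list[int], num_bins: int) -> int:
--     """Chi-squared test for uniformity * 1000. Lower = more uniform."""
--     n = len(values)
--     expected = n // num_bins
--     if expected == 0:
--         expected = 1
--     chi_sq = 0
--     for j in range(num_bins):
--         observed = 0
--         for v in values:
--             if v % num_bins == j:
--                 observed = observed + 1
--         diff = observed - expected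
--         chi_sq = chi_sq + diff * diff * 1000 // expected
--     return chi_sq
-- ===== Notes on version B (the rewrite author's own statement) =====
-- stated objective: simpler
-- what changed: B drops A's mutable dense bin array (pre-allocation loop, index-assignment histogram pass, second indexed read-back pass) and instead computes each bin's observed count directly by scanning the values per residue class, accumulating the chi-squared sum in one comprehension-style loop over range(num_bins).
import Mathlib
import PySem

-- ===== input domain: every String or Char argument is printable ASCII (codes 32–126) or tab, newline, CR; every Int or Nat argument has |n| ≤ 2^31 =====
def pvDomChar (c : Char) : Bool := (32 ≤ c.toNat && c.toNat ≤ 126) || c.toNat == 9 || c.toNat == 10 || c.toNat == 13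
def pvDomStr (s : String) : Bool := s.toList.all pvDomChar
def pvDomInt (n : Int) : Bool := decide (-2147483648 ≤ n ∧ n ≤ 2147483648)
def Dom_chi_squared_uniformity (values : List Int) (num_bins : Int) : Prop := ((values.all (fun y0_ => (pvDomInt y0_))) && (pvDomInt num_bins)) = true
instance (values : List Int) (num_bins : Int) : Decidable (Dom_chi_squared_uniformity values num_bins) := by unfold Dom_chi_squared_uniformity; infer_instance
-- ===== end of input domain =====

-- B replaces A's mutable dense bin array (allocation loop, index-assignment histogram pass, indexed
-- read-back pass) by counting each residue class directly inside one loop over the bins (objective: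
-- simpler; not faster).


-- ===== PORT A =====
-- pyGetD's default 0 is only reached outside Pre_ (under Pre_ every index and bucket is in range).
def chi_squared_uniformity (values : List Int) (num_bins : Int) : Int :=
  let bins0 : List Int := (PySem.List.pyRange 0 num_bins 1).foldl (fun b _ => b ++ [(0 : Int)]) []
  let n : Int := (values.length : Int)
  let bins : List Int := (PySem.List.pyRange 0 n 1).foldl (fun b i =>
      let vv := PySem.List.pyGetD values i 0
      let bucket := PySem.Int.mod vv num_bins
      let old := PySem.List.pyGetD b bucket 0
      PySem.List.pySetD b bucket (old + 1)) bins0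
  let expected0 : Int := PySem.Int.floordiv n num_bins
  let expected : Int := if expected0 = 0 then 1 else expected0
  (PySem.List.pyRange 0 num_bins 1).foldl (fun chi j =>
      let observed := PySem.List.pyGetD bins j 0
      let diff := observed - expected
      chi + PySem.Int.floordiv (diff * diff * 1000) expected) 0

-- ===== PORT B =====
def chi_squared_uniformity_alt (values : List Int) (num_bins : Int) : Int :=
  let n : Int := (values.length : Int)
  let expected0 : Int := PySem.Int.floordiv n num_bins
  let expected : Int := if expected0 = 0 then 1 else expected0
  (PySem.List.pyRange 0 num_bins 1).foldl (fun chi j =>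
      let observed : Int := values.foldl (fun o v => if PySem.Int.mod v num_bins = j then o + 1 else o) 0
      let diff := observed - expected
      chi + PySem.Int.floordiv (diff * diff * 1000) expected) 0

-- ===== PRECONDITION & SPEC =====
-- Pre_ excludes exactly the inputs where A raises: num_bins = 0 (ZeroDivisionError from '% 0' or '// 0')
-- and num_bins < 0 with nonempty values (IndexError: bins is empty but bins[bucket] is read).
def Pre_chi_squared_uniformity (values : List Int) (num_bins : Int) : Prop :=
  1 ≤ num_bins ∨ (num_bins < 0 ∧ values = [])
instance (values : List Int) (num_bins : Int) : Decidable (Pre_chi_squared_uniformity values num_bins) := by unfold Pre_chi_squared_uniformity; infer_instance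
def pvWitness_chi_squared_uniformity : List Int × Int := ([0, 1, 2, 5, -3], 3)

def Spec_chi_squared_uniformity (values : List Int) (num_bins : Int) (out : Int) : Prop := out = chi_squared_uniformity_alt values num_bins
instance (values : List Int) (num_bins : Int) (out : Int) : Decidable (Spec_chi_squared_uniformity values num_bins out) := by unfold Spec_chi_squared_uniformity; infer_instance

-- ===== CLAIM (what is proved, stated in full; the proofs are below) =====
def Claim_equal_chi_squared_uniformity : Prop := ∀ (values : List Int) (num_bins : Int), Dom_chi_squared_uniformity values num_bins → Pre_chi_squared_uniformity values num_bins → Spec_chi_squared_uniformity values num_bins (chi_squared_uniformity values num_bins)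

-- ===== LEMMAS AND PROOFS =====

-- A's histogram loop, over the values themselves: the bin list keeps length num_bins.toNat and
-- slot t gains exactly the number of processed values whose residue mod num_bins is t.
theorem pv_bins_char (num_bins : Int) (hnb : 1 ≤ num_bins) :
    ∀ (vs : List Int) (bins : List Int), bins.length = num_bins.toNat →
      (vs.foldl (fun b vv => PySem.List.pySetD b (PySem.Int.mod vv num_bins)
          (PySem.List.pyGetD b (PySem.Int.mod vv num_bins) 0 + 1)) bins).length = num_bins.toNat ∧
      ∀ (t : Nat), t < num_bins.toNat →
        PySem.List.pyGetD (vs.foldl (fun b vv => PySem.List.pySetD b (PySem.Int.mod vv num_bins)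
            (PySem.List.pyGetD b (PySem.Int.mod vv num_bins) 0 + 1)) bins) (t : Int) 0 =
          PySem.List.pyGetD bins (t : Int) 0 +
            (vs.countP (fun v => decide (PySem.Int.mod v num_bins = (t : Int))) : Int) := by
  intro vs
  induction vs with
  | nil => intro bins hlen; simp [hlen]
  | cons v vs ih =>
    intro bins hlen
    have hm0 : 0 ≤ PySem.Int.mod v num_bins := PySem.Int.mod_nonneg v (by omega)
    have hm1 : PySem.Int.mod v num_bins < num_bins := PySem.Int.mod_lt v (by omega)
    have hmt : ((PySem.Int.mod v num_bins).toNat : Int) = PySem.Int.mod v num_bins :=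
      Int.toNat_of_nonneg hm0
    have hmlt : (PySem.Int.mod v num_bins).toNat < bins.length := by omega
    have hlen' : (PySem.List.pySetD bins (PySem.Int.mod v num_bins)
        (PySem.List.pyGetD bins (PySem.Int.mod v num_bins) 0 + 1)).length = num_bins.toNat := by
      rw [PySem.List.pySetD_of_nonneg _ _ hm0, List.length_set]; exact hlen
    obtain ⟨hl, hg⟩ := ih _ hlen'
    refine ⟨by simpa using hl, ?_⟩
    intro t ht
    have hrec := hg t ht
    simp only [List.foldl_cons]
    rw [hrec]
    have hstep : PySem.List.pyGetD (PySem.List.pySetD bins (PySem.Int.mod v num_bins)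
        (PySem.List.pyGetD bins (PySem.Int.mod v num_bins) 0 + 1)) (t : Int) 0 =
        if t = (PySem.Int.mod v num_bins).toNat then
          PySem.List.pyGetD bins ((PySem.Int.mod v num_bins).toNat : Int) 0 + 1
        else PySem.List.pyGetD bins (t : Int) 0 := by
      rw [← hmt]
      exact PySem.List.pyGetD_pySetD_natCast bins _ t _ 0 hmlt
    rw [hstep, List.countP_cons]
    by_cases hc : PySem.Int.mod v num_bins = (t : Int)
    · have heq : t = (PySem.Int.mod v num_bins).toNat := by omega
      rw [if_pos heq, ← heq]
      simp [hc]
      ring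
    · have hne : ¬ (t = (PySem.Int.mod v num_bins).toNat) := by omega
      simp [hc, hne]

-- The two programs agree on every input of Pre_.
theorem pv_main (values : List Int) (num_bins : Int)
    (hpre : 1 ≤ num_bins ∨ (num_bins < 0 ∧ values = [])) :
    chi_squared_uniformity values num_bins = chi_squared_uniformity_alt values num_bins := by
  rcases hpre with hnb | ⟨hneg, hnil⟩
  · simp only [chi_squared_uniformity, chi_squared_uniformity_alt]
    rw [PySem.List.foldl_append_singleton_eq_map (f := fun _ => (0 : Int))]
    simp only [List.nil_append, List.map_const', PySem.List.length_pyRange_one]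
    rw [PySem.List.foldl_pyRange_pyGetD' values 0
        (f := fun b vv => PySem.List.pySetD b (PySem.Int.mod vv num_bins)
          (PySem.List.pyGetD b (PySem.Int.mod vv num_bins) 0 + 1)) _ (le_refl 0)]
    simp only [Int.toNat_zero, List.drop_zero]
    obtain ⟨hlen, hchar⟩ := pv_bins_char num_bins hnb values
      (List.replicate (num_bins - 0).toNat 0) (by simp)
    refine PySem.List.foldl_congr_mem _ _ _ _ ?_
    intro acc j hj
    obtain ⟨hj0, hj1⟩ := PySem.List.mem_pyRange_one.mp hj
    have hjt : ((j.toNat : Nat) : Int) = j := Int.toNat_of_nonneg hj0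
    have ho := hchar j.toNat (by omega)
    rw [hjt] at ho
    have hz : PySem.List.pyGetD (List.replicate (num_bins - 0).toNat (0 : Int)) j 0 = 0 := by
      rw [PySem.List.pyGetD_eq_getElem _ 0 hj0 (by simp; omega)]
      simp
    rw [hz, zero_add] at ho
    rw [PySem.List.foldl_ite_add_one, ho]
    ring_nf
  · subst hnil
    simp only [chi_squared_uniformity, chi_squared_uniformity_alt]
    rw [PySem.List.pyRange_one_eq_nil (le_of_lt hneg)]
    simp

-- ===== VERDICT (by name: the statement is the Claim_ definition above) =====
theorem chi_squared_uniformity_spec : Claim_equal_chi_squared_uniformity := by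
  intro values num_bins _ hpre
  unfold Pre_chi_squared_uniformity at hpre
  unfold Spec_chi_squared_uniformity
  exact pv_main values num_bins hpre
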